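-- pv_equiv track=rewrite | github.com/yunfanz11/Riddler | 20190215_Price is right.py | possibleOutcome
-- ===== SOURCE A (Python) =====
-- import itertools
--
-- def possibleOutcome(options):
--     sol = []
--     normal = [True, False]
--     special = [True]
--     for x in options:
--         if x == 1:
--             sol.append(special)
--         else:
--             sol.append(normal)
--
--     sol = list(itertools.product(*sol))
--     return sol
-- ===== SOURCE B (Python) =====
-- def possibleOutcome(options):
--     def go(rest):
--         if not rest:
--             return [()]
--         choices = [True] if rest[0] == 1 else [True, False]
--         tails = go(rest[1:])
--         return [(c,) + t for c in choices for t in tails]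
--     return go(list(options))
-- ===== Notes on version B (the rewrite author's own statement) =====
-- stated objective: alternative
-- what changed: Replaces the build-a-list-of-pools-then-itertools.product pass with a direct recursive enumeration over the options (base case [()], prepend each choice to every recursively built tail).
import Mathlib
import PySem

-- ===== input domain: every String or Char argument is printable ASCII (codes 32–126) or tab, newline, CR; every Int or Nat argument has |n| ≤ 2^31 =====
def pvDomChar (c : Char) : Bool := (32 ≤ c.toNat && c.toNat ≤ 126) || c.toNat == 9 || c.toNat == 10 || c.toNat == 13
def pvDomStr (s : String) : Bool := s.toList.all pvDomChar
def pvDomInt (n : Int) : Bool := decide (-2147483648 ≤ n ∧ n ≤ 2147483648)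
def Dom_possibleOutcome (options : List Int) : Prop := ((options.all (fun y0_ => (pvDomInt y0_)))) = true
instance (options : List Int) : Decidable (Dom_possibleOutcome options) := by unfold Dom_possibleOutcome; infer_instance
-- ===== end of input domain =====

-- B enumerates the outcomes by direct recursion on the options list instead of building
-- a list of choice pools and taking itertools.product; same cost, different decomposition.

-- ===== PORT A =====
-- itertools.product(*pools): left-to-right fold extending each partial tuple by every
-- element of the next pool (leftmost varies slowest), exactly product's order.
def pvProduct (pools : List (List Bool)) : List (List Bool) :=
  pools.foldl (fun acc pool => acc.flatMap (fun r => pool.map (fun c => r ++ [c]))) [[]]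

def possibleOutcome (options : List Int) : List (List Bool) :=
  let sol := options.foldl (fun sol x => sol ++ [if x == 1 then [true] else [true, false]]) []
  pvProduct sol

-- ===== PORT B =====
def possibleOutcome_altGo : List Int → List (List Bool)
  | [] => [[]]
  | x :: rest =>
      let choices := if x == 1 then [true] else [true, false]
      let tails := possibleOutcome_altGo rest
      choices.flatMap (fun c => tails.map (fun t => c :: t))

def possibleOutcome_alt (options : List Int) : List (List Bool) :=
  possibleOutcome_altGo options

-- ===== PRECONDITION & SPEC =====
def Spec_possibleOutcome (options : List Int) (out : List (List Bool)) : Prop := out = possibleOutcome_alt options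
instance (options : List Int) (out : List (List Bool)) : Decidable (Spec_possibleOutcome options out) := by unfold Spec_possibleOutcome; infer_instance

-- ===== CLAIM (what is proved, stated in full; the proofs are below) =====
def Claim_equal_possibleOutcome : Prop := ∀ (options : List Int), Dom_possibleOutcome options → Spec_possibleOutcome options (possibleOutcome options)

-- ===== LEMMAS AND PROOFS =====

-- recursive product of a list of pools (the shape of B's recursion, over pools)
def recProd : List (List Bool) → List (List Bool)
  | [] => [[]]
  | p :: ps => p.flatMap (fun c => (recProd ps).map (fun t => c :: t))

theorem foldl_product_eq (pools : List (List Bool)) :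
    ∀ acc : List (List Bool),
      pools.foldl (fun acc pool => acc.flatMap (fun r => pool.map (fun c => r ++ [c]))) acc
        = acc.flatMap (fun r => (recProd pools).map (fun t => r ++ t)) := by
  induction pools with
  | nil => intro acc; simp [recProd]
  | cons p ps ih =>
      intro acc
      simp only [List.foldl_cons, ih, recProd, List.flatMap_assoc]
      congr 1
      funext r
      simp [List.flatMap_map, List.map_flatMap, List.map_map, Function.comp_def, List.append_assoc]

theorem sol_eq (options : List Int) :
    options.foldl (fun sol x => sol ++ [if x == 1 then [true] else [true, false]]) []
      = options.map (fun x => if x == 1 then [true] else [true, false]) := by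
  have h : ∀ (l : List Int) (acc : List (List Bool)),
      l.foldl (fun sol x => sol ++ [if x == 1 then [true] else [true, false]]) acc
        = acc ++ l.map (fun x => if x == 1 then [true] else [true, false]) := by
    intro l
    induction l with
    | nil => intro acc; simp
    | cons x xs ih => intro acc; rw [List.foldl_cons, ih]; simp
  simpa using h options []

theorem recProd_map_eq (options : List Int) :
    recProd (options.map (fun x => if x == 1 then [true] else [true, false]))
      = possibleOutcome_altGo options := by
  induction options with
  | nil => rfl
  | cons x xs ih =>
      simp only [List.map_cons, recProd, possibleOutcome_altGo]
      rw [ih]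

-- ===== VERDICT (by name: the statement is the Claim_ definition above) =====
theorem possibleOutcome_spec : Claim_equal_possibleOutcome := by
  intro options _
  show possibleOutcome options = possibleOutcome_alt options
  simp only [possibleOutcome, pvProduct, possibleOutcome_alt, sol_eq,
    foldl_product_eq, recProd_map_eq, List.flatMap_cons, List.flatMap_nil]
  simp
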